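-- pv_equiv track=rewrite | github.com/MatiPl01/Wstep-do-Informatyki | Ćwiczenia/1. Zajęcia/Zadanie2/Program1.py | get_inital_fib_values
-- ===== SOURCE A (Python) =====
-- def num_in_fib(checked_value: int, a: '1st value of a sequence' = 1, b: '2nd value of a sequence' = 1) -> bool:
-- 	if a == checked_value or b == checked_value: return True
-- 	while b < checked_value:
-- 		a, b = b, a + b
-- 	return b == checked_value
--
-- def get_inital_fib_values(num: int) -> tuple:
-- 	lowest = num, num
-- 	for a in range(1, num+1):
-- 		for b in range(a, num+1):
-- 			if a*2 > sum(lowest):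
-- 				break
-- 			if num_in_fib(num, a, b) and a + b < sum(lowest):
-- 				lowest = a, b
-- 	return lowest
-- ===== SOURCE B (Python) =====
-- def _contains(num, a, b):
--     # is num a term of the Fibonacci-like sequence starting a, b ?
--     while b < num:
--         a, b = b, a + b
--     return a == num or b == num
--
--
-- def get_inital_fib_values(num: int) -> tuple:
--     # Search candidate start pairs (a, b), a <= b, in increasing order of
--     # their sum (and, for equal sums, increasing a), returning the first
--     # pair whose sequence contains num: that is exactly the minimal pair.
--     if num < 1:
--         return num, num
--     s = 2
--     while True:
--         for a in range(1, s // 2 + 1):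
--             if _contains(num, a, s - a):
--                 return a, s - a
--         s += 1  # guaranteed to hit (1, num) at s = num + 1
-- ===== Notes on version B (the rewrite author's own statement) =====
-- stated objective: faster
-- what changed: Instead of scanning all pairs a<=b<=num and tracking the best, B enumerates candidate pairs in increasing order of their sum (and of a within a sum) and returns the first pair whose Fibonacci-like sequence contains num, which is exactly the minimum A computes.
import Mathlib
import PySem

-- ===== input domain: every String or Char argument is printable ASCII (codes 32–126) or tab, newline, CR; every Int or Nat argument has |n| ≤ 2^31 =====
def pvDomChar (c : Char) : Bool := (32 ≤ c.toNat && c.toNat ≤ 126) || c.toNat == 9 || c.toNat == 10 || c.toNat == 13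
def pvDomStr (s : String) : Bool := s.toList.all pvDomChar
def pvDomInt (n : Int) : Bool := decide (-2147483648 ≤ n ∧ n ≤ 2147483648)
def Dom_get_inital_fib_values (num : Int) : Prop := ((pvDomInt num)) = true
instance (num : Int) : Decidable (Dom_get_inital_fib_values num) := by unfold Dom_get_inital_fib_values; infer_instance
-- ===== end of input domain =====

-- B searches start pairs in increasing order of their sum and returns the first whose
-- sequence contains num (measured much faster than A's full double scan with pruning).

-- ===== PORT A =====
-- while-loop of num_in_fib; fuel only makes it total (≤ checked iterations when 1 ≤ a ≤ b)
def numInFibLoop (checked : Int) : Nat → Int → Int → Bool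
  | 0, _, b => b == checked
  | f + 1, a, b => if b < checked then numInFibLoop checked f b (a + b) else b == checked

def num_in_fib (checked a b : Int) : Bool :=
  if a == checked || b == checked then true
  else numInFibLoop checked (checked.toNat + 1) a b

-- inner 'for b' loop of A, with its break
def innerA (num a : Int) : List Int → Int × Int → Int × Int
  | [], lowest => lowest
  | b :: rest, lowest =>
    if a * 2 > lowest.1 + lowest.2 then lowest
    else innerA num a rest
      (if num_in_fib num a b && decide (a + b < lowest.1 + lowest.2) then (a, b) else lowest)

def get_inital_fib_values (num : Int) : Int × Int :=
  (PySem.List.pyRange 1 (num + 1) 1).foldl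
    (fun lowest a => innerA num a (PySem.List.pyRange a (num + 1) 1) lowest) (num, num)

-- ===== PORT B =====
-- while-loop of B's _contains; fuel only makes it total (≤ num iterations when 1 ≤ a ≤ b)
def containsLoopB (num : Int) : Nat → Int → Int → Bool
  | 0, a, b => a == num || b == num
  | f + 1, a, b => if b < num then containsLoopB num f b (a + b) else a == num || b == num

def containsB (num a b : Int) : Bool := containsLoopB num (num.toNat + 1) a b

-- 'while True' loop of B over the sum s; fuel only makes it total (the search
-- is shown to return by s = num + 1)
def searchB (num : Int) : Nat → Int → Int × Int
  | 0, _ => (num, num)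
  | f + 1, s =>
    match (PySem.List.pyRange 1 (PySem.Int.floordiv s 2 + 1) 1).find?
        (fun a => containsB num a (s - a)) with
    | some a => (a, s - a)
    | none => searchB num f (s + 1)

def get_inital_fib_values_alt (num : Int) : Int × Int :=
  if num < 1 then (num, num) else searchB num num.toNat 2

-- ===== PRECONDITION & SPEC =====
def Spec_get_inital_fib_values (num : Int) (out : Int × Int) : Prop := out = get_inital_fib_values_alt num
instance (num : Int) (out : Int × Int) : Decidable (Spec_get_inital_fib_values num out) := by unfold Spec_get_inital_fib_values; infer_instance

-- ===== CLAIM (what is proved, stated in full; the proofs are below) =====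
def Claim_equal_get_inital_fib_values : Prop := ∀ (num : Int), Dom_get_inital_fib_values num → Spec_get_inital_fib_values num (get_inital_fib_values num)

-- ===== LEMMAS AND PROOFS =====

-- the set of admissible valid start pairs, and the (sum, first) key order
def InV (num : Int) (p : Int × Int) : Prop :=
  1 ≤ p.1 ∧ p.1 ≤ p.2 ∧ p.2 ≤ num ∧ containsB num p.1 p.2 = true

def kle (p q : Int × Int) : Prop :=
  p.1 + p.2 < q.1 + q.2 ∨ (p.1 + p.2 = q.1 + q.2 ∧ p.1 ≤ q.1)

theorem kle_refl (p : Int × Int) : kle p p := Or.inr ⟨rfl, le_refl _⟩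

theorem kle_antisymm {p q : Int × Int} (h1 : kle p q) (h2 : kle q p) : p = q := by
  rcases p with ⟨a, b⟩; rcases q with ⟨c, d⟩
  unfold kle at h1 h2; simp only at h1 h2
  have : a = c ∧ b = d := by omega
  simp [this.1, this.2]

-- the two containment loops agree when 1 ≤ a ≤ b
theorem containsLoop_eq (num : Int) (f : Nat) :
    ∀ a b : Int, 1 ≤ a → a ≤ b →
      containsLoopB num f a b = ((a == num) || numInFibLoop num f a b) := by
  induction f with
  | zero => intro a b _ _; simp [containsLoopB, numInFibLoop]
  | succ f ih =>
    intro a b ha hab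
    simp only [containsLoopB, numInFibLoop]
    by_cases hb : b < num
    · have ha' : (a == num) = false := by
        simp only [beq_eq_false_iff_ne]; omega
      have hb' : (b == num) = false := by
        simp only [beq_eq_false_iff_ne]; omega
      rw [if_pos hb, if_pos hb, ih b (a + b) (by omega) (by omega), hb']
      simp [ha']
    · rw [if_neg hb, if_neg hb]

theorem num_in_fib_eq_containsB (num a b : Int) (ha : 1 ≤ a) (hab : a ≤ b) :
    num_in_fib num a b = containsB num a b := by
  unfold num_in_fib containsB
  rw [containsLoop_eq num _ a b ha hab]
  by_cases hA : a = num
  · simp [hA]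
  · by_cases hB : b = num
    · have hloop : numInFibLoop num (num.toNat + 1) a num = true := by
        simp [numInFibLoop]
      simp [hB, hloop]
    · simp [hA, hB]

theorem containsB_second (num a : Int) :
    containsB num a num = true := by
  simp [containsB, containsLoopB]

-- ---------- A side ----------

theorem innerA_spec (num a : Int) (ha : 1 ≤ a) :
    ∀ (bs : List Int) (l : Int × Int),
      (∀ b ∈ bs, a ≤ b ∧ b ≤ num) →
      (l.1 ≤ a ∨ a + num < l.1 + l.2) →
      ((innerA num a bs l = l ∨
          (InV num (innerA num a bs l) ∧ (innerA num a bs l).1 = a ∧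
           (innerA num a bs l).1 + (innerA num a bs l).2 < l.1 + l.2)) ∧
       (∀ b ∈ bs, containsB num a b = true → kle (innerA num a bs l) (a, b))) := by
  intro bs
  induction bs with
  | nil => intro l _ _; exact ⟨Or.inl rfl, by intro b hb; simp at hb⟩
  | cons b rest ih =>
    intro l hbs hl
    have hb0 := hbs b (by simp)
    simp only [innerA]
    by_cases hbrk : a * 2 > l.1 + l.2
    · rw [if_pos hbrk]
      refine ⟨Or.inl rfl, ?_⟩
      intro b' hb' _
      have := hbs b' hb'
      exact Or.inl (by simp only; omega)
    · rw [if_neg hbrk]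
      by_cases hcond : (num_in_fib num a b && decide (a + b < l.1 + l.2)) = true
      · -- update to (a, b)
        rw [if_pos hcond]
        simp only [Bool.and_eq_true, decide_eq_true_eq] at hcond
        have hvalid : containsB num a b = true := by
          rw [← num_in_fib_eq_containsB num a b ha hb0.1]; exact hcond.1
        have hInV : InV num (a, b) := ⟨ha, hb0.1, hb0.2, hvalid⟩
        obtain ⟨S1, S2⟩ := ih (a, b) (fun x hx => hbs x (by simp [hx])) (Or.inl (le_refl a))
        constructor
        · rcases S1 with h | h
          · exact Or.inr ⟨by rw [h]; exact hInV, by rw [h], by rw [h]; exact hcond.2⟩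
          · exact Or.inr ⟨h.1, h.2.1, by have := h.2.2; simp only at this ⊢; omega⟩
        · intro b'' hb'' hv
          rcases List.mem_cons.mp hb'' with h | h
          · subst h
            rcases S1 with h1 | h1
            · rw [h1]; exact kle_refl _
            · exact Or.inl (by have := h1.2.2; simp only at this ⊢; omega)
          · exact S2 b'' h hv
      · -- no update
        rw [if_neg hcond]
        obtain ⟨S1, S2⟩ := ih l (fun x hx => hbs x (by simp [hx])) hl
        refine ⟨S1, ?_⟩
        intro b'' hb'' hv
        rcases List.mem_cons.mp hb'' with h | h
        · rw [h] at hv ⊢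
          -- cond failed though valid: so ¬(a + b < sum l)
          have hfib : num_in_fib num a b = true := by
            rw [num_in_fib_eq_containsB num a b ha hb0.1]; exact hv
          have hge : l.1 + l.2 ≤ a + b := by
            by_contra hlt
            exact hcond (by simp [hfib]; omega)
          rcases S1 with h1 | h1
          · rw [h1]
            rcases lt_or_eq_of_le hge with h2 | h2
            · exact Or.inl (by simp only; omega)
            · refine Or.inr ⟨by simp only; omega, ?_⟩
              rcases hl with h3 | h3
              · exact h3
              · exfalso; have := hb0.2; omega
          · exact Or.inl (by have := h1.2.2; simp only at this ⊢; omega)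
        · exact S2 b'' h hv

theorem outerA_spec (num : Int) :
    ∀ (as : List Int) (l : Int × Int),
      (∀ a ∈ as, 1 ≤ a ∧ a ≤ num) →
      as.Pairwise (· ≤ ·) →
      (∀ a ∈ as, l.1 ≤ a ∨ a + num < l.1 + l.2) →
      (let r := as.foldl (fun lo a => innerA num a (PySem.List.pyRange a (num + 1) 1) lo) l
       (r = l ∨ InV num r) ∧
       (∀ q, kle l q → kle r q) ∧
       (∀ p, InV num p → p.1 ∈ as → kle r p) ∧
       r.1 + r.2 ≤ l.1 + l.2) := by
  intro as
  induction as with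
  | nil =>
    intro l _ _ _
    exact ⟨Or.inl rfl, fun q h => h, fun p _ hmem => by simp at hmem, le_refl _⟩
  | cons a as' ih =>
    intro l has hord hset
    have ha : 1 ≤ a ∧ a ≤ num := has a (by simp)
    have hbs : ∀ b ∈ PySem.List.pyRange a (num + 1) 1, a ≤ b ∧ b ≤ num := by
      intro b hb
      have := (PySem.List.mem_pyRange_one).mp hb
      omega
    obtain ⟨S1, S2⟩ := innerA_spec num a ha.1 (PySem.List.pyRange a (num + 1) 1) l hbs
      (hset a (by simp))
    set r1 := innerA num a (PySem.List.pyRange a (num + 1) 1) l with hr1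
    have hsum1 : r1.1 + r1.2 ≤ l.1 + l.2 := by
      rcases S1 with h | h
      · rw [h]
      · exact le_of_lt h.2.2
    have hord' : as'.Pairwise (· ≤ ·) := (List.pairwise_cons.mp hord).2
    have hle_a : ∀ a' ∈ as', a ≤ a' := (List.pairwise_cons.mp hord).1
    have hset' : ∀ a' ∈ as', r1.1 ≤ a' ∨ a' + num < r1.1 + r1.2 := by
      intro a' ha'
      rcases S1 with h | h
      · rw [h]; exact hset a' (by simp [ha'])
      · exact Or.inl (by rw [h.2.1]; exact hle_a a' ha')
    obtain ⟨T1, T2, T3, T4⟩ := ih r1 (fun x hx => has x (by simp [hx])) hord' hset'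
    simp only [List.foldl_cons]
    rw [← hr1]
    refine ⟨?_, ?_, ?_, ?_⟩
    · rcases T1 with h | h
      · rw [h]
        rcases S1 with h1 | h1
        · exact Or.inl h1
        · exact Or.inr h1.1
      · exact Or.inr h
    · intro q hq
      apply T2
      rcases S1 with h | h
      · rw [h]; exact hq
      · rcases hq with h1 | h1
        · exact Or.inl (by have := h.2.2; omega)
        · exact Or.inl (by have := h.2.2; omega)
    · intro p hp hpmem
      rcases List.mem_cons.mp hpmem with h | h
      · -- p.1 = a : handled by the inner pass
        have hp2 : p.2 ∈ PySem.List.pyRange a (num + 1) 1 := by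
          rw [PySem.List.mem_pyRange_one]
          have := hp.2.1; have := hp.2.2.1; omega
        have hS2 := S2 p.2 hp2 (by rw [← h]; exact hp.2.2.2)
        have hkle : kle r1 p := by
          unfold kle at hS2 ⊢
          simp only at hS2
          omega
        apply T2; exact hkle
      · exact T3 p hp h
    · omega

theorem A_in_V (num : Int) (hnum : 1 ≤ num) :
    InV num (get_inital_fib_values num) ∧
    (∀ p, InV num p → kle (get_inital_fib_values num) p) := by
  have has : ∀ a ∈ PySem.List.pyRange 1 (num + 1) 1, 1 ≤ a ∧ a ≤ num := by
    intro a ha; have := (PySem.List.mem_pyRange_one).mp ha; omega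
  have hord : (PySem.List.pyRange 1 (num + 1) 1).Pairwise (· ≤ ·) :=
    (PySem.List.pairwise_lt_pyRange_one 1 (num + 1)).imp (fun h => le_of_lt h)
  have hset : ∀ a ∈ PySem.List.pyRange 1 (num + 1) 1,
      (num, num).1 ≤ a ∨ a + num < (num, num).1 + (num, num).2 := by
    intro a ha; have := (PySem.List.mem_pyRange_one).mp ha
    simp only; omega
  obtain ⟨T1, _, T3, _⟩ := outerA_spec num (PySem.List.pyRange 1 (num + 1) 1) (num, num) has hord hset
  have hres : get_inital_fib_values num =
      (PySem.List.pyRange 1 (num + 1) 1).foldl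
        (fun lo a => innerA num a (PySem.List.pyRange a (num + 1) 1) lo) (num, num) := rfl
  constructor
  · rw [hres]
    rcases T1 with h | h
    · rw [h]; exact ⟨hnum, le_refl _, le_refl _, containsB_second num num⟩
    · exact h
  · intro p hp
    rw [hres]
    apply T3 p hp
    rw [PySem.List.mem_pyRange_one]
    have := hp.1; have := hp.2.1; have := hp.2.2.1; omega

-- ---------- B side ----------

-- find? on a strictly sorted list returns an element ≤ any satisfying element
theorem find?_first {q : Int → Bool} :
    ∀ (l : List Int), l.Pairwise (· < ·) → ∀ (a x : Int),
      l.find? q = some a → x ∈ l → q x = true → a ≤ x := by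
  intro l
  induction l with
  | nil => intro _ a x h; simp at h
  | cons y ys ih =>
    intro hpw a x hf hx hq
    have hpw' := List.pairwise_cons.mp hpw
    by_cases hy : q y = true
    · rw [List.find?_cons_of_pos hy] at hf
      have : a = y := by simpa using hf.symm
      subst this
      rcases List.mem_cons.mp hx with h | h
      · omega
      · exact le_of_lt (hpw'.1 x h)
    · rw [List.find?_cons_of_neg (by simp [hy])] at hf
      rcases List.mem_cons.mp hx with h | h
      · exact absurd (h ▸ hq) (by simp [hy])
      · exact ih hpw'.2 a x hf h hq

theorem row_mem (s a : Int) (hp : 1 ≤ a) (hab : a + a ≤ s) :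
    a ∈ PySem.List.pyRange 1 (PySem.Int.floordiv s 2 + 1) 1 := by
  rw [PySem.List.mem_pyRange_one]
  refine ⟨hp, ?_⟩
  have : a ≤ PySem.Int.floordiv s 2 := by
    rw [PySem.Int.le_floordiv_iff_mul_le (by norm_num)]
    omega
  omega

theorem searchB_spec (num : Int) (hnum : 1 ≤ num) :
    ∀ (f : Nat) (s : Int), 2 ≤ s → s ≤ num + 1 → num + 2 ≤ s + (f : Int) →
      (∀ p, InV num p → s ≤ p.1 + p.2) →
      (InV num (searchB num f s) ∧
       ∀ p, InV num p → kle (searchB num f s) p) := by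
  intro f
  induction f with
  | zero => intro s h2 hle hf _; exfalso; simp at hf; omega
  | succ f ih =>
    intro s h2 hle hf hprev
    simp only [searchB]
    rcases hfind : (PySem.List.pyRange 1 (PySem.Int.floordiv s 2 + 1) 1).find?
        (fun a => containsB num a (s - a)) with _ | a
    · -- row s exhausted: no valid pair has sum s
      have hnone : ∀ p, InV num p → p.1 + p.2 ≠ s := by
        intro p hp hsum
        have hmem : p.1 ∈ PySem.List.pyRange 1 (PySem.Int.floordiv s 2 + 1) 1 :=
          row_mem s p.1 hp.1 (by have := hp.2.1; omega)
        have hq : containsB num p.1 (s - p.1) = true := by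
          have : s - p.1 = p.2 := by omega
          rw [this]; exact hp.2.2.2
        have : ((PySem.List.pyRange 1 (PySem.Int.floordiv s 2 + 1) 1).find?
            (fun a => containsB num a (s - a))).isSome := by
          rw [List.find?_isSome]
          exact ⟨p.1, hmem, hq⟩
        rw [hfind] at this; simp at this
      have hs_lt : s ≤ num := by
        by_contra h
        have hseq : s = num + 1 := by omega
        exact hnone (1, num) ⟨le_refl _, hnum, le_refl _,
          containsB_second num 1⟩ (by simp [hseq]; ring)
      have := ih (s + 1) (by omega) (by omega) (by push_cast at hf ⊢; omega)
        (fun p hp => by have h1 := hprev p hp; have h2 := hnone p hp; omega)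
      exact this
    · -- found the first valid a in row s
      have ha := List.find?_some hfind
      have hamem := List.mem_of_find?_eq_some hfind
      rw [PySem.List.mem_pyRange_one] at hamem
      have ha2 : a ≤ PySem.Int.floordiv s 2 := by omega
      have haa : a + a ≤ s := by
        rw [PySem.Int.le_floordiv_iff_mul_le (by norm_num)] at ha2
        omega
      simp only at ha
      have hInV : InV num (a, s - a) :=
        ⟨hamem.1, by simp only; omega, by simp only; omega, ha⟩
      refine ⟨hInV, ?_⟩
      intro p hp
      have hsge := hprev p hp
      rcases lt_or_eq_of_le hsge with h | h
      · exact Or.inl (by simp only; omega)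
      · -- same sum: find?_first gives a ≤ p.1
        refine Or.inr ⟨by simp only; omega, ?_⟩
        have hmem : p.1 ∈ PySem.List.pyRange 1 (PySem.Int.floordiv s 2 + 1) 1 :=
          row_mem s p.1 hp.1 (by have := hp.2.1; omega)
        have hq : containsB num p.1 (s - p.1) = true := by
          have : s - p.1 = p.2 := by omega
          rw [this]; exact hp.2.2.2
        exact find?_first _ (PySem.List.pairwise_lt_pyRange_one _ _) a p.1 hfind hmem hq

theorem B_in_V (num : Int) (hnum : 1 ≤ num) :
    InV num (get_inital_fib_values_alt num) ∧
    (∀ p, InV num p → kle (get_inital_fib_values_alt num) p) := by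
  have h : get_inital_fib_values_alt num = searchB num num.toNat 2 := by
    unfold get_inital_fib_values_alt
    rw [if_neg (by omega)]
  rw [h]
  exact searchB_spec num hnum num.toNat 2 (le_refl _) (by omega)
    (by have : (num.toNat : Int) = num := Int.toNat_of_nonneg (by omega); omega)
    (fun p hp => by have := hp.1; have := hp.2.1; omega)

-- ===== VERDICT (by name: the statement is the Claim_ definition above) =====
theorem get_inital_fib_values_spec : Claim_equal_get_inital_fib_values := by
  intro num _
  unfold Spec_get_inital_fib_values
  by_cases hnum : 1 ≤ num
  · obtain ⟨hA, hAmin⟩ := A_in_V num hnum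
    obtain ⟨hB, hBmin⟩ := B_in_V num hnum
    exact kle_antisymm (hAmin _ hB) (hBmin _ hA)
  · have hA : get_inital_fib_values num = (num, num) := by
      unfold get_inital_fib_values
      rw [PySem.List.pyRange_one_eq_nil (by omega)]
      rfl
    have hB : get_inital_fib_values_alt num = (num, num) := by
      unfold get_inital_fib_values_alt
      rw [if_pos (by omega)]
    rw [hA, hB]
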